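-- pv_equiv track=rewrite | github.com/886814/Algorithm | 2024 NAVER/점수 올리기.py | move_numbers
-- ===== SOURCE A (Python) =====
-- from collections import deque
-- from heapq import heappop, heappush
--
-- def move_numbers(cap, k, score, m):
--     set_ = set()
--     upper = deque()
--     lower = []
--
--     for i, sc in enumerate(score):
--         if sc > k:
--             upper.append([sc, i])
--         else:
--             heappush(lower, [sc, i])
--
--     if len(upper) < m:
--         return 0
--
--     while len(upper) >= m:
--         if not lower:
--             return -1
--
--         upper_e1 = upper[-1]
--         lower_e1 = heappop(lower)
--         diff = min(upper_e1[0] - k, k - lower_e1[0])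
--
--         if diff == 0:
--             return -1
--
--         set_.add(upper_e1[1])
--         set_.add(lower_e1[1])
--
--         upper_e1[0] -= diff
--         lower_e1[0] += diff
--
--         if upper_e1[0] == k:
--             upper.pop()
--
--         if lower_e1[0] < k:
--             heappush(lower, lower_e1)
--
--     return len(set_)
-- ===== SOURCE B (Python) =====
-- from heapq import heappush, heappop
--
-- def move_numbers(cap, k, score, m):
--     uppers = [(sc, i) for i, sc in enumerate(score) if sc > k]
--     if len(uppers) < m:
--         return 0
--     lowers = sorted((sc, i) for i, sc in enumerate(score) if sc <= k)
--     need = sum(sc - k for sc, _ in uppers[m - 1:])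
--     room = sum(k - sc for sc, _ in lowers)
--     if need > room:
--         return -1
--     # feasible: no return path inside the loop; count touches instead of keeping a set
--     touched = len(uppers) - (m - 1)       # every processed upper index is touched exactly once
--     carries = []                          # partially refilled lowers, a small heap
--     ptr = 0                               # originals are consumed in sorted order
--     for sc, _i in reversed(uppers[m - 1:]):
--         r = sc - k
--         while r > 0:
--             if carries and (ptr >= len(lowers) or carries[0] < lowers[ptr]):
--                 low, j = heappop(carries)
--             else:
--                 low, j = lowers[ptr]
--                 ptr += 1
--                 touched += 1
--             take = min(r, k - low)
--             r -= take
--             if low + take < k: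
--                 heappush(carries, (low + take, j))
--     return touched
-- ===== Notes on version B (the rewrite author's own statement) =====
-- stated objective: faster
-- what changed: B decides the -1 and 0 outcomes arithmetically up front (comparing the total excess of the processed above-threshold entries with the total refill room of the below-threshold entries), then runs a transfer loop with no return paths that consumes the once-sorted lowers through an advancing pointer plus a small heap holding only partially refilled carries, and counts touches with integer counters instead of maintaining a set; …
-- outside the precondition, e.g. on move_numbers(0, 5, [], 0): A returns -1, B returns 1; on move_numbers(0, 5, [7, 3], 0): A returns -1, B returns 3; on move_numbers(0, 5, [7, 3, 3], 0): A raises IndexError, B returns 3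
import Mathlib
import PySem

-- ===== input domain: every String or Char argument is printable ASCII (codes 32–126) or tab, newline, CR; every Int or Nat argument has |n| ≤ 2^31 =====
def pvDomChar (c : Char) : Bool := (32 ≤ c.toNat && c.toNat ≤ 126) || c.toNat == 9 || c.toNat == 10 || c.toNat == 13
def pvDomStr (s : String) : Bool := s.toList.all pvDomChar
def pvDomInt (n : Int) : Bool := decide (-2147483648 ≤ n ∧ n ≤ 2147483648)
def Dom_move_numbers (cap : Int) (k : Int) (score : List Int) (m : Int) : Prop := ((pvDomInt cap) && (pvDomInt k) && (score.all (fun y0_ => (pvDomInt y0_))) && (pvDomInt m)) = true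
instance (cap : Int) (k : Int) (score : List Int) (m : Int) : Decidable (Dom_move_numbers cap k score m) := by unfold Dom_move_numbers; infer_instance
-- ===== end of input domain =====

-- B decides the -1/0 outcomes arithmetically up front (total excess vs total refill room) and then
-- counts touches while consuming the once-sorted lowers through a pointer plus a small carry heap;
-- A discovers everything inside one while-loop over a deque and a single heap. Equivalence for m >= 1.


-- ===== PORT A =====
-- Python's list comparison [a,b] < [c,d] (both ints): lexicographic strict order.
def lexLt (a b : Int × Int) : Bool := decide (a.1 < b.1 ∨ (a.1 = b.1 ∧ a.2 < b.2))

-- heapq contract port: the heap is its multiset of entries (push = append),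
-- heappop extracts the (first occurrence of the) lexicographically least entry.
def popMin : List (Int × Int) → Option ((Int × Int) × List (Int × Int))
  | [] => none
  | x :: xs =>
    match popMin xs with
    | none => some (x, [])
    | some (mn, rest) => if lexLt mn x then some (mn, x :: rest) else some (x, xs)

-- facts cited by the ports' decreasing_by clauses
theorem popMin_none : ∀ (l : List (Int × Int)), popMin l = none ↔ l = [] := by
  intro l; cases l with
  | nil => simp [popMin]
  | cons y ys =>
    simp only [popMin]
    cases popMin ys with
    | none => simp
    | some p => obtain ⟨mn, rest⟩ := p; by_cases h : lexLt mn y = true <;> simp [h]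

theorem popMin_perm : ∀ (l : List (Int × Int)) x r, popMin l = some (x, r) → (x :: r).Perm l := by
  intro l
  induction l with
  | nil => intro x r h; simp [popMin] at h
  | cons y ys ih =>
    intro x r h
    simp only [popMin] at h
    cases hpm : popMin ys with
    | none =>
      rw [hpm] at h
      simp at h
      obtain ⟨h1, h2⟩ := h; subst h1; subst h2
      have : ys = [] := (popMin_none ys).mp hpm
      subst this; exact List.Perm.refl _
    | some p =>
      obtain ⟨mn, rest⟩ := p
      rw [hpm] at h
      have hper := ih mn rest hpm
      by_cases hc : lexLt mn y = true <;> simp [hc] at h <;> obtain ⟨h1, h2⟩ := h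
      · subst h1; subst h2
        exact ((List.Perm.swap y mn rest).trans (hper.cons y)).symm.symm
      · subst h1; subst h2; exact List.Perm.refl _

theorem popMin_length (l : List (Int × Int)) (x : Int × Int) (r : List (Int × Int))
    (h : popMin l = some (x, r)) : r.length + 1 = l.length := by
  have := (popMin_perm l x r h).length_eq
  simpa using this

-- measure arithmetic cited by aLoop's decreasing_by
theorem aLoop_dec (k : Int) (ue lo : Int × Int) (U rest : List (Int × Int)) (uL lL : Nat)
    (hU : U.length + 1 = uL) (hrl : rest.length + 1 = lL) :
    (dite (ue.1 - min (ue.1 - k) (k - lo.1) = k) (fun _ => U)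
        (fun _ => U ++ [(ue.1 - min (ue.1 - k) (k - lo.1), ue.2)])).length +
      (dite (lo.1 + min (ue.1 - k) (k - lo.1) < k)
        (fun _ => rest ++ [(lo.1 + min (ue.1 - k) (k - lo.1), lo.2)]) (fun _ => rest)).length
      < uL + lL := by
  split
  case isTrue h1 =>
    split
    case isTrue h2 =>
      simp only [List.length_append, List.length_cons, List.length_nil]
      clear h1 h2
      omega
    case isFalse h2 =>
      clear h1 h2
      omega
  case isFalse h1 =>
    split
    case isTrue h2 =>
      exfalso
      rcases min_choice (ue.1 - k) (k - lo.1) with hm | hm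
      · exact h1 (by rw [hm]; ring)
      · rw [hm] at h2
        clear h1 hm
        omega
    case isFalse h2 =>
      simp only [List.length_append, List.length_cons, List.length_nil]
      clear h1 h2
      omega

-- A's while-loop: state = (touched set, upper deque, heap contents)
def aLoop (k m : Int) (st : PySem.Set Int) (upper lower : List (Int × Int)) : Int :=
  if m ≤ (upper.length : Int) then
    match hpm : popMin lower with
    | none => -1
    | some (lo, rest) =>
      match hgl : upper.getLast? with
      | none => -1  -- unreachable under Pre_ (m ≥ 1 forces upper ≠ []); Python raises IndexError here
      | some ue =>
        if min (ue.1 - k) (k - lo.1) = 0 then -1   -- diff = min(upper-k, k-lower)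
        else
          aLoop k m (PySem.Set.add (PySem.Set.add st ue.2) lo.2)
            (if ue.1 - min (ue.1 - k) (k - lo.1) = k then upper.dropLast
             else upper.dropLast ++ [(ue.1 - min (ue.1 - k) (k - lo.1), ue.2)])
            (if lo.1 + min (ue.1 - k) (k - lo.1) < k then rest ++ [(lo.1 + min (ue.1 - k) (k - lo.1), lo.2)]
             else rest)
  else PySem.Set.len st
termination_by upper.length + lower.length
decreasing_by
  have hrl := popMin_length lower lo rest hpm
  have hne : upper ≠ [] := by intro e; rw [e] at hgl; simp at hgl
  have h1 : upper.dropLast.length + 1 = upper.length := by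
    cases upper with
    | nil => exact absurd rfl hne
    | cons a as => simp
  exact aLoop_dec k ue lo upper.dropLast rest upper.length lower.length h1 hrl

def move_numbers (cap : Int) (k : Int) (score : List Int) (m : Int) : Int :=
  -- for i, sc in enumerate(score): append to upper if sc > k else push onto the heap
  let init := (PySem.List.enumerate score).foldl
    (fun (st : List (Int × Int) × List (Int × Int)) p =>
      if k < p.2 then (st.1 ++ [(p.2, p.1)], st.2) else (st.1, st.2 ++ [(p.2, p.1)]))
    ([], [])
  if (init.1.length : Int) < m then 0
  else aLoop k m PySem.Set.empty init.1 init.2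

-- ===== PORT B =====
-- sum(sc - k for sc, _ in ...) and sum(k - sc for sc, _ in ...)
def sumExcess (k : Int) (l : List (Int × Int)) : Int := l.foldl (fun s p => s + (p.1 - k)) 0
def sumRoom (k : Int) (l : List (Int × Int)) : Int := l.foldl (fun s p => s + (k - p.1)) 0

-- cited by bInner's decreasing_by
theorem pyGet?_lt_length {α : Type} (xs : List α) (i : Int) (x : α)
    (h : PySem.List.pyGet? xs i = some x) : i < (xs.length : Int) := by
  by_contra hc
  have h0 : 0 ≤ i := by omega
  rw [show i = ((i.toNat : Nat) : Int) from (Int.toNat_of_nonneg h0).symm,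
      PySem.List.pyGet?_natCast] at h
  obtain ⟨hlt, -⟩ := List.getElem?_eq_some_iff.mp h
  omega

-- measure arithmetic cited by bInner's decreasing_by
theorem bInner_dec1 (A : Nat) (crest carries : List (Int × Int)) (w : Int × Int) (k c1 r : Int)
    (hr : 0 < r) (hcl : crest.length + 1 = carries.length) :
    (A * 2 + (dite (c1 + min r (k - c1) < k) (fun _ => crest ++ [w]) (fun _ => crest)).length) * 2 +
      (if 0 < r - min r (k - c1) then 1 else 0) < (A * 2 + carries.length) * 2 + (if 0 < r then 1 else 0) := by
  rw [if_pos hr]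
  by_cases h : c1 + min r (k - c1) < k
  · rw [dif_pos h]
    have htr : min r (k - c1) = r := by
      rcases min_choice r (k - c1) with hm | hm
      · exact hm
      · rw [hm] at h ⊢
        exact absurd h (by simp)
    rw [htr, sub_self, if_neg (lt_irrefl 0)]
    simp only [List.length_append, List.length_cons, List.length_nil, hcl]
    exact Nat.lt_succ_self _
  · rw [dif_neg h]
    have hb : (if 0 < r - min r (k - c1) then 1 else 0) ≤ 1 := by
      split
      · exact le_refl 1
      · exact Nat.zero_le 1
    calc (A * 2 + crest.length) * 2 + (if 0 < r - min r (k - c1) then 1 else 0)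
        ≤ (A * 2 + crest.length) * 2 + 1 := Nat.add_le_add_left hb _
      _ < (A * 2 + carries.length) * 2 + 1 := by
          clear hb h hr
          omega

theorem bInner_dec2 (L p : Int) (carries : List (Int × Int)) (w : Int × Int) (k o1 r : Int)
    (hr : 0 < r) (hp : p < L) :
    ((L - (p + 1)).toNat * 2 +
        (dite (o1 + min r (k - o1) < k) (fun _ => carries ++ [w]) (fun _ => carries)).length) * 2 +
      (if 0 < r - min r (k - o1) then 1 else 0) < ((L - p).toNat * 2 + carries.length) * 2 + (if 0 < r then 1 else 0) := by
  rw [if_pos hr]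
  have h0 : (0:Int) ≤ L - (p + 1) := by omega
  have hL : (L - p).toNat = (L - (p + 1)).toNat + 1 := by
    rw [show L - p = (L - (p + 1)) + 1 from by ring, Int.toNat_add h0 (by norm_num)]
    rfl
  rw [hL]
  have hb : (if 0 < r - min r (k - o1) then 1 else 0) ≤ 1 := by
    split
    · exact le_refl 1
    · exact Nat.zero_le 1
  generalize (L - (p + 1)).toNat = a
  by_cases h : o1 + min r (k - o1) < k
  · rw [dif_pos h]
    simp only [List.length_append, List.length_cons, List.length_nil]
    calc (a * 2 + (carries.length + 1)) * 2 + (if 0 < r - min r (k - o1) then 1 else 0)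
        ≤ (a * 2 + (carries.length + 1)) * 2 + 1 := Nat.add_le_add_left hb _
      _ < ((a + 1) * 2 + carries.length) * 2 + 1 := by
          clear hb h h0 hp hr hL
          omega
  · rw [dif_neg h]
    calc (a * 2 + carries.length) * 2 + (if 0 < r - min r (k - o1) then 1 else 0)
        ≤ (a * 2 + carries.length) * 2 + 1 := Nat.add_le_add_left hb _
      _ < ((a + 1) * 2 + carries.length) * 2 + 1 := by
          clear hb h h0 hp hr hL
          omega

-- B's inner while-loop: push the current excess r into the lowers; the state it returns is
-- (touched, ptr, carries); none = Python's IndexError on lowers[ptr] (unreachable once need ≤ room)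
def bInner (k : Int) (lowers : List (Int × Int)) (r touched ptr : Int) (carries : List (Int × Int)) :
    Option (Int × Int × List (Int × Int)) :=
  if hr : 0 < r then
    match hc : popMin carries with
    | some (c, crest) =>
      match ho : PySem.List.pyGet? lowers ptr with
      | some o =>
        if lexLt c o then
          bInner k lowers (r - min r (k - c.1)) touched ptr
            (if c.1 + min r (k - c.1) < k then crest ++ [(c.1 + min r (k - c.1), c.2)] else crest)
        else
          bInner k lowers (r - min r (k - o.1)) (touched + 1) (ptr + 1)
            (if o.1 + min r (k - o.1) < k then carries ++ [(o.1 + min r (k - o.1), o.2)] else carries)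
      | none =>
        bInner k lowers (r - min r (k - c.1)) touched ptr
          (if c.1 + min r (k - c.1) < k then crest ++ [(c.1 + min r (k - c.1), c.2)] else crest)
    | none =>
      match ho : PySem.List.pyGet? lowers ptr with
      | some o =>
        bInner k lowers (r - min r (k - o.1)) (touched + 1) (ptr + 1)
          (if o.1 + min r (k - o.1) < k then carries ++ [(o.1 + min r (k - o.1), o.2)] else carries)
      | none => none
  else some (touched, ptr, carries)
termination_by ((((lowers.length : Int) - ptr).toNat * 2 + carries.length) * 2 + (if 0 < r then 1 else 0))
decreasing_by
  · have hl := popMin_length carries c crest hc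
    exact bInner_dec1 _ crest carries _ k c.1 r hr hl
  · have hp := pyGet?_lt_length lowers ptr o ho
    exact bInner_dec2 (lowers.length : Int) ptr carries _ k o.1 r hr hp
  · have hl := popMin_length carries c crest hc
    exact bInner_dec1 _ crest carries _ k c.1 r hr hl
  · have hp := pyGet?_lt_length lowers ptr o ho
    exact bInner_dec2 (lowers.length : Int) ptr carries _ k o.1 r hr hp

-- B's outer for-loop over reversed(uppers[m-1:])
def bOuter (k : Int) (lowers : List (Int × Int)) : List (Int × Int) → Int → Int → List (Int × Int) → Int
  | [], touched, _, _ => touched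
  | u :: os, touched, ptr, carries =>
    match bInner k lowers (u.1 - k) touched ptr carries with
    | none => 0   -- Python raises IndexError here; unreachable once need ≤ room
    | some tpc => bOuter k lowers os tpc.1 tpc.2.1 tpc.2.2

def move_numbers_alt (cap : Int) (k : Int) (score : List Int) (m : Int) : Int :=
  let en := PySem.List.enumerate score
  let uppers := (en.filter (fun p => decide (k < p.2))).map (fun p => (p.2, p.1))
  if (uppers.length : Int) < m then 0
  else
    -- lowers = sorted(...): Python's stable sort of (score, index) pairs
    let lowers := ((en.filter (fun p => decide (p.2 ≤ k))).map (fun p => (p.2, p.1))).mergeSort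
      (fun a b => !lexLt b a)
    let proc := uppers.drop (m - 1).toNat
    if sumRoom k lowers < sumExcess k proc then -1
    else bOuter k lowers proc.reverse ((uppers.length : Int) - (m - 1)) 0 []

-- ===== PRECONDITION & SPEC =====
-- Pre_ excludes m ≤ 0: there A's loop guard len(upper) >= m can never become false, so A raises
-- IndexError once upper empties while lower is nonempty, and its -1 returns on the remaining
-- m ≤ 0 inputs are artefacts of the same runaway loop (B's slice uppers[m-1:] wraps there).
def Pre_move_numbers (cap : Int) (k : Int) (score : List Int) (m : Int) : Prop := 1 ≤ m
instance (cap : Int) (k : Int) (score : List Int) (m : Int) : Decidable (Pre_move_numbers cap k score m) := by unfold Pre_move_numbers; infer_instance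
def pvWitness_move_numbers : Int × Int × List Int × Int := (0, 5, [7, 3], 1)

def Spec_move_numbers (cap : Int) (k : Int) (score : List Int) (m : Int) (out : Int) : Prop := out = move_numbers_alt cap k score m
instance (cap : Int) (k : Int) (score : List Int) (m : Int) (out : Int) : Decidable (Spec_move_numbers cap k score m out) := by unfold Spec_move_numbers; infer_instance

-- ===== CLAIM (what is proved, stated in full; the proofs are below) =====
def Claim_equal_move_numbers : Prop := ∀ (cap : Int) (k : Int) (score : List Int) (m : Int), Dom_move_numbers cap k score m → Pre_move_numbers cap k score m → Spec_move_numbers cap k score m (move_numbers cap k score m)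

-- ===== LEMMAS AND PROOFS =====

theorem lexLt_irrefl (a : Int × Int) : lexLt a a = false := by
  obtain ⟨a1, a2⟩ := a; simp [lexLt]

theorem lexLt_asymm {a b : Int × Int} (h : lexLt a b = true) : lexLt b a = false := by
  obtain ⟨a1, a2⟩ := a; obtain ⟨b1, b2⟩ := b; simp [lexLt] at *; omega

theorem lexLt_neg_total {a b : Int × Int} (h1 : lexLt a b = false) (h2 : lexLt b a = false) : a = b := by
  obtain ⟨a1, a2⟩ := a; obtain ⟨b1, b2⟩ := b; simp [lexLt] at *; omega

theorem lexLt_neg_trans {a b c : Int × Int} (h1 : lexLt b a = false) (h2 : lexLt c b = false) :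
    lexLt c a = false := by
  obtain ⟨a1, a2⟩ := a; obtain ⟨b1, b2⟩ := b; obtain ⟨c1, c2⟩ := c; simp [lexLt] at *; omega

theorem lexLt_trans {a b c : Int × Int} (h1 : lexLt a b = true) (h2 : lexLt b c = true) :
    lexLt a c = true := by
  obtain ⟨a1, a2⟩ := a; obtain ⟨b1, b2⟩ := b; obtain ⟨c1, c2⟩ := c; simp [lexLt] at *; omega

theorem lexLt_lt_of_lt_of_nlt {z o c : Int × Int} (h1 : lexLt z o = true) (h2 : lexLt c o = false) :
    lexLt z c = true := by
  obtain ⟨z1, z2⟩ := z; obtain ⟨o1, o2⟩ := o; obtain ⟨c1, c2⟩ := c; simp [lexLt] at *; omega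

theorem popMin_min : ∀ (l : List (Int × Int)) x r, popMin l = some (x, r) →
    ∀ z ∈ l, lexLt z x = false := by
  intro l
  induction l with
  | nil => intro x r h; simp [popMin] at h
  | cons y ys ih =>
    intro x r h z hz
    simp only [popMin] at h
    cases hpm : popMin ys with
    | none =>
      rw [hpm] at h; simp at h
      obtain ⟨h1, h2⟩ := h; subst h1
      have hys : ys = [] := (popMin_none ys).mp hpm
      subst hys
      simp at hz; subst hz; exact lexLt_irrefl _
    | some p =>
      obtain ⟨mn, rest⟩ := p
      rw [hpm] at h
      have hmin := ih mn rest hpm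
      by_cases hc : lexLt mn y = true
      · simp [hc] at h
        obtain ⟨h1, h2⟩ := h; subst h1
        rcases List.mem_cons.mp hz with rfl | hz'
        · exact lexLt_asymm hc
        · exact hmin z hz'
      · simp [hc] at h
        obtain ⟨h1, h2⟩ := h; subst h1
        have hc' : lexLt mn y = false := by simpa using hc
        rcases List.mem_cons.mp hz with rfl | hz'
        · exact lexLt_irrefl _
        · exact lexLt_neg_trans hc' (hmin z hz')

-- a list permuted to (c :: tl) with c minimal pops exactly c
theorem popMin_of_min (l tl : List (Int × Int)) (c : Int × Int)
    (hp : l.Perm (c :: tl)) (hmin : ∀ z ∈ l, lexLt z c = false) :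
    ∃ r, popMin l = some (c, r) ∧ r.Perm tl := by
  cases hq : popMin l with
  | none =>
    have : l = [] := (popMin_none l).mp hq
    subst this; exact absurd hp.symm.eq_nil (by simp)
  | some p =>
    obtain ⟨x, r⟩ := p
    have hxr := popMin_perm l x r hq
    have hx_mem : x ∈ l := hxr.subset (List.mem_cons_self ..)
    have hc_mem : c ∈ l := hp.symm.subset (List.mem_cons_self ..)
    have h1 : lexLt x c = false := hmin x hx_mem
    have h2 : lexLt c x = false := popMin_min l x r hq c hc_mem
    have hx : x = c := lexLt_neg_total h1 h2
    subst hx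
    exact ⟨r, rfl, (hxr.trans hp).cons_inv⟩

theorem sumExcess_eq (k : Int) (l : List (Int × Int)) :
    sumExcess k l = (l.map (fun p => p.1 - k)).sum := by
  unfold sumExcess
  rw [PySem.List.foldl_add l (fun p => p.1 - k) 0]
  ring

theorem sumRoom_eq (k : Int) (l : List (Int × Int)) :
    sumRoom k l = (l.map (fun p => k - p.1)).sum := by
  unfold sumRoom
  rw [PySem.List.foldl_add l (fun p => k - p.1) 0]
  ring

theorem sumRoom_perm (k : Int) {l l' : List (Int × Int)} (h : l.Perm l') :
    sumRoom k l = sumRoom k l' := by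
  rw [sumRoom_eq, sumRoom_eq]; exact (h.map _).sum_eq

theorem sumExcess_perm (k : Int) {l l' : List (Int × Int)} (h : l.Perm l') :
    sumExcess k l = sumExcess k l' := by
  rw [sumExcess_eq, sumExcess_eq]; exact (h.map _).sum_eq

theorem sumRoom_nonneg (k : Int) (l : List (Int × Int)) (h : ∀ x ∈ l, x.1 ≤ k) :
    0 ≤ sumRoom k l := by
  rw [sumRoom_eq]
  apply List.sum_nonneg
  intro x hx
  obtain ⟨p, hp, rfl⟩ := List.mem_map.mp hx
  have := h p hp; omega

theorem sumExcess_nonneg (k : Int) (l : List (Int × Int)) (h : ∀ x ∈ l, k < x.1) :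
    0 ≤ sumExcess k l := by
  rw [sumExcess_eq]
  apply List.sum_nonneg
  intro x hx
  obtain ⟨p, hp, rfl⟩ := List.mem_map.mp hx
  have := h p hp; omega

-- Python set semantics used by the counting invariant
theorem set_add_of_mem {s : PySem.Set Int} {x : Int} (h : x ∈ s) : PySem.Set.add s x = s := by
  simp [PySem.Set.add, h]

theorem set_len_add_of_not_mem {s : PySem.Set Int} {x : Int} (h : x ∉ s) :
    PySem.Set.len (PySem.Set.add s x) = PySem.Set.len s + 1 := by
  simp [PySem.Set.add, PySem.Set.len, h]

-- A's filtering fold splits into the two filters B uses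
theorem initA (k : Int) : ∀ (l : List (Int × Int)) (u v : List (Int × Int)),
    l.foldl
      (fun (st : List (Int × Int) × List (Int × Int)) p =>
        if k < p.2 then (st.1 ++ [(p.2, p.1)], st.2) else (st.1, st.2 ++ [(p.2, p.1)]))
      (u, v)
    = (u ++ (l.filter (fun p => decide (k < p.2))).map (fun p => (p.2, p.1)),
       v ++ (l.filter (fun p => decide (p.2 ≤ k))).map (fun p => (p.2, p.1))) := by
  intro l
  induction l with
  | nil => intro u v; simp
  | cons p l ih =>
    intro u v
    by_cases hc : k < p.2
    · have hc2 : ¬ (p.2 ≤ k) := by omega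
      simp [hc, hc2, ih, List.append_assoc]
    · have hc2 : p.2 ≤ k := by omega
      simp [hc, hc2, ih, List.append_assoc]

theorem sumExcess_append (k : Int) (l1 l2 : List (Int × Int)) :
    sumExcess k (l1 ++ l2) = sumExcess k l1 + sumExcess k l2 := by
  simp [sumExcess_eq]

theorem sumRoom_append (k : Int) (l1 l2 : List (Int × Int)) :
    sumRoom k (l1 ++ l2) = sumRoom k l1 + sumRoom k l2 := by
  simp [sumRoom_eq]

theorem sumExcess_singleton (k : Int) (p : Int × Int) : sumExcess k [p] = p.1 - k := by
  simp [sumExcess_eq]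

theorem sumRoom_singleton (k : Int) (p : Int × Int) : sumRoom k [p] = k - p.1 := by
  simp [sumRoom_eq]

theorem sumExcess_cons (k : Int) (p : Int × Int) (l : List (Int × Int)) :
    sumExcess k (p :: l) = (p.1 - k) + sumExcess k l := by
  simp [sumExcess_eq]

theorem sumRoom_cons (k : Int) (p : Int × Int) (l : List (Int × Int)) :
    sumRoom k (p :: l) = (k - p.1) + sumRoom k l := by
  simp [sumRoom_eq]

-- A returns -1 whenever the total excess exceeds the total room (their difference is invariant)
theorem aLoop_infeasible (k m : Int) (hm : 1 ≤ m) :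
    ∀ (n : Nat) (upper heap : List (Int × Int)), upper.length + heap.length = n →
    (∀ x ∈ upper, k < x.1) → (∀ x ∈ heap, x.1 ≤ k) →
    sumRoom k heap < sumExcess k (upper.drop (m - 1).toNat) →
    ∀ st, aLoop k m st upper heap = -1 := by
  intro n
  induction n using Nat.strong_induction_on with
  | _ n ih =>
  intro upper heap hn hup hle hinf st
  rw [aLoop]
  by_cases hcond : m ≤ (upper.length : Int)
  case neg =>
    exfalso
    have hdrop : upper.drop (m - 1).toNat = [] := List.drop_eq_nil_of_le (by omega)
    rw [hdrop] at hinf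
    have := sumRoom_nonneg k heap hle
    simp [sumExcess] at hinf
    omega
  case pos =>
    rw [if_pos hcond]
    split
    · rfl
    case _ lo rest heq =>
      have hne : upper ≠ [] := by intro e; subst e; simp at hcond; omega
      split
      · rfl
      case _ ue hgl =>
        by_cases hd0 : min (ue.1 - k) (k - lo.1) = 0
        · rw [if_pos hd0]
        rw [if_neg hd0]
        set diff := min (ue.1 - k) (k - lo.1) with hdiff
        have hgl2 : upper.getLast? = some (upper.getLast hne) := List.getLast?_eq_some_getLast hne
        have hue : ue = upper.getLast hne := by
          exact (Option.some.inj (hgl2.symm.trans hgl)).symm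
        set U := upper.dropLast with hU
        have hUL : U ++ [ue] = upper := by rw [hue]; exact List.dropLast_append_getLast hne
        have hlen : U.length + 1 = upper.length := by rw [← hUL]; simp
        have hdle : (m - 1).toNat ≤ U.length := by omega
        have hsplit : upper.drop (m - 1).toNat = U.drop (m - 1).toNat ++ [ue] := by
          conv_lhs => rw [← hUL]
          rw [List.drop_append_of_le_length hdle]
        have hexc : sumExcess k (upper.drop (m - 1).toNat)
            = sumExcess k (U.drop (m - 1).toNat) + (ue.1 - k) := by
          rw [hsplit, sumExcess_append, sumExcess_singleton]
        have hperm := popMin_perm heap lo rest heq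
        have hroom : sumRoom k heap = (k - lo.1) + sumRoom k rest := by
          rw [← sumRoom_perm k hperm, sumRoom_cons]
        have hrlen : rest.length + 1 = heap.length := popMin_length heap lo rest heq
        have hrle : ∀ x ∈ rest, x.1 ≤ k := fun x hx => hle x (hperm.subset (List.mem_cons_of_mem lo hx))
        have hlo_le : lo.1 ≤ k := hle lo (hperm.subset (List.mem_cons_self ..))
        have hue_gt : k < ue.1 := hup ue (by rw [← hUL]; exact List.mem_append_right U (List.mem_singleton_self ue))
        have hUup : ∀ x ∈ U, k < x.1 := fun x hx => hup x (List.mem_of_mem_dropLast hx)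
        have hUdrop : ∀ nu : Int × Int, (U ++ [nu]).drop (m - 1).toNat = U.drop (m - 1).toNat ++ [nu] :=
          fun nu => List.drop_append_of_le_length hdle
        split_ifs with hc1 hc2 hc2
        · -- upper entry reaches k, lower pushed back
          apply ih (U.length + (rest ++ [(lo.1 + diff, lo.2)]).length) (by simp; omega) U _ rfl hUup
          · intro x hx
            rcases List.mem_append.mp hx with hx' | hx'
            · exact hrle x hx'
            · simp at hx'; subst hx'; simpa using (by omega : lo.1 + diff ≤ k)
          · rw [sumRoom_append, sumRoom_singleton]
            omega
        · -- upper entry reaches k, lower consumed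
          apply ih (U.length + rest.length) (by omega) U rest rfl hUup hrle
          omega
        · -- upper entry stays, lower pushed back
          apply ih ((U ++ [(ue.1 - diff, ue.2)]).length + (rest ++ [(lo.1 + diff, lo.2)]).length)
            (by simp; omega) _ _ rfl
          · intro x hx
            rcases List.mem_append.mp hx with hx' | hx'
            · exact hUup x hx'
            · simp at hx'; subst hx'; simp; omega
          · intro x hx
            rcases List.mem_append.mp hx with hx' | hx'
            · exact hrle x hx'
            · simp at hx'; subst hx'; simp; omega
          · rw [hUdrop, sumExcess_append, sumExcess_singleton, sumRoom_append, sumRoom_singleton]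
            simp only []
            omega
        · -- upper entry stays, lower consumed
          apply ih ((U ++ [(ue.1 - diff, ue.2)]).length + rest.length) (by simp; omega) _ rest rfl
          · intro x hx
            rcases List.mem_append.mp hx with hx' | hx'
            · exact hUup x hx'
            · simp at hx'; subst hx'; simp; omega
          · exact hrle
          · rw [hUdrop, sumExcess_append, sumExcess_singleton]
            simp only []
            omega

theorem perm_shuffle (A S : List (Int × Int)) (w : Int × Int) :
    ((A ++ S) ++ [w]).Perm ((A ++ [w]) ++ S) := by
  rw [show (A ++ S) ++ [w] = A ++ (S ++ [w]) from by simp [List.append_assoc],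
      show (A ++ [w]) ++ S = A ++ ([w] ++ S) from by simp [List.append_assoc]]
  exact List.Perm.append_left A List.perm_append_comm

-- bisimulation of one upper entry: A's flat loop vs B's inner while-loop
theorem inner_sim (k m : Int) (base lowers : List (Int × Int))
    (hbase : (base.length : Int) = m - 1)
    (hlow_le : ∀ x ∈ lowers, x.1 ≤ k)
    (hsorted : lowers.Pairwise (fun a b => lexLt b a = false))
    (hnodup_low : (lowers.map Prod.snd).Nodup)
    (os : List (Int × Int))
    (hos_up : ∀ x ∈ os, k < x.1)
    (hcont : ∀ (st' : PySem.Set Int) (heap' carries' : List (Int × Int)) (touched' ptr' : Int),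
      0 ≤ ptr' → ptr' ≤ (lowers.length : Int) →
      heap'.Perm (carries' ++ lowers.drop ptr'.toNat) →
      (∀ c ∈ carries', c.1 < k) →
      (∀ c ∈ carries', c.2 ∈ st') →
      ((carries'.map Prod.snd).Nodup) →
      (∀ x ∈ lowers.drop ptr'.toNat, x.2 ∉ st') →
      (∀ u ∈ os, u.2 ∉ st') →
      sumExcess k os ≤ sumRoom k heap' →
      touched' = PySem.Set.len st' + (os.length : Int) →
      aLoop k m st' (base ++ os.reverse) heap' = bOuter k lowers os touched' ptr' carries') :
    ∀ (n : Nat) (heap : List (Int × Int)), heap.length = n →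
    ∀ (st : PySem.Set Int) (carries : List (Int × Int)) (touched ptr r i : Int),
      0 < r →
      0 ≤ ptr → ptr ≤ (lowers.length : Int) →
      heap.Perm (carries ++ lowers.drop ptr.toNat) →
      (∀ c ∈ carries, c.1 < k) →
      (∀ c ∈ carries, c.2 ∈ PySem.Set.add st i) →
      ((carries.map Prod.snd).Nodup) →
      (∀ x ∈ lowers.drop ptr.toNat, x.2 ∉ st ∧ x.2 ≠ i) →
      (∀ u ∈ os, u.2 ∉ st ∧ u.2 ≠ i ∧ ∀ x ∈ lowers, u.2 ≠ x.2) →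
      r + sumExcess k os ≤ sumRoom k heap →
      touched = PySem.Set.len (PySem.Set.add st i) + (os.length : Int) →
      aLoop k m st (base ++ os.reverse ++ [(k + r, i)]) heap =
        (match bInner k lowers r touched ptr carries with
         | none => 0
         | some tpc => bOuter k lowers os tpc.1 tpc.2.1 tpc.2.2) := by
  intro n
  induction n using Nat.strong_induction_on with
  | _ n ih =>
  intro heap hn st carries touched ptr r i hr hptr0 hptrle hperm hclt hcmem hcnodup hsufffresh hosfresh hfeas htouch
  have hheap_le : ∀ z ∈ heap, z.1 ≤ k := by
    intro z hz
    rcases List.mem_append.mp (hperm.subset hz) with h | h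
    · exact le_of_lt (hclt z h)
    · exact hlow_le z (List.mem_of_mem_drop h)
  have hosexc : 0 ≤ sumExcess k os := sumExcess_nonneg k os hos_up
  have hcond : m ≤ ((base ++ os.reverse ++ [(k + r, i)]).length : Int) := by
    simp; omega
  have himem : i ∈ PySem.Set.add st i := (PySem.Set.mem_add st i i).mpr (Or.inr rfl)
  -- the common step: once the popped element x is identified, both sides advance in lockstep
  have key : ∀ (x : Int × Int) (restA carriesP : List (Int × Int)) (ptr' touched' : Int),
      popMin heap = some (x, restA) →
      restA.Perm (carriesP ++ lowers.drop ptr'.toNat) →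
      0 ≤ ptr' → ptr' ≤ (lowers.length : Int) →
      (∀ c ∈ carriesP, c.1 < k) →
      (∀ c ∈ carriesP, c.2 ∈ PySem.Set.add st i) →
      ((carriesP.map Prod.snd).Nodup) →
      (x.2 ∉ (carriesP.map Prod.snd)) →
      (∀ z ∈ lowers.drop ptr'.toNat, z.2 ∉ st ∧ z.2 ≠ i ∧ z.2 ≠ x.2) →
      (∀ u ∈ os, u.2 ≠ x.2) →
      ((x.2 ∈ PySem.Set.add st i ∧ touched' = touched) ∨ (x.2 ∉ PySem.Set.add st i ∧ touched' = touched + 1)) →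
      aLoop k m st (base ++ os.reverse ++ [(k + r, i)]) heap =
        (match bInner k lowers (r - min r (k - x.1)) touched' ptr'
            (if x.1 + min r (k - x.1) < k then carriesP ++ [(x.1 + min r (k - x.1), x.2)] else carriesP) with
         | none => 0
         | some tpc => bOuter k lowers os tpc.1 tpc.2.1 tpc.2.2) := by
    intro x restA carriesP ptr' touched' hpopA hrperm hp'0 hp'le hPlt hPmem hPnodup hxP hSfresh hosx hcount
    have hxheap : x ∈ heap := (popMin_perm heap x restA hpopA).subset (List.mem_cons_self ..)
    have hxmin : ∀ z ∈ heap, lexLt z x = false := popMin_min heap x restA hpopA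
    have hx_le : x.1 ≤ k := hheap_le x hxheap
    have hroomheap : sumRoom k heap = (k - x.1) + sumRoom k restA := by
      rw [← sumRoom_perm k (popMin_perm heap x restA hpopA), sumRoom_cons]
    have hxlt : x.1 < k := by
      by_contra hxk
      have hzero : sumRoom k heap = 0 := by
        rw [sumRoom_eq]
        apply List.sum_eq_zero
        intro y hy
        obtain ⟨p, hp, rfl⟩ := List.mem_map.mp hy
        have h1 := hxmin p hp
        have h2 := hheap_le p hp
        simp [lexLt] at h1
        omega
      omega
    have hrlen : restA.length + 1 = heap.length := popMin_length heap x restA hpopA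
    set take := min r (k - x.1) with htakedef
    have htkr : take ≤ r := min_le_left _ _
    have htkx : take ≤ k - x.1 := min_le_right _ _
    have htkpos : 0 < take := by omega
    -- freshness/membership helpers for the grown set
    have hmemup : ∀ a : Int, a ∈ PySem.Set.add st i →
        a ∈ PySem.Set.add (PySem.Set.add st i) x.2 :=
      fun a h => (PySem.Set.mem_add _ _ _).mpr (Or.inl h)
    have hx2mem : x.2 ∈ PySem.Set.add (PySem.Set.add st i) x.2 :=
      (PySem.Set.mem_add _ _ _).mpr (Or.inr rfl)
    have hnot2 : ∀ a : Int, a ∉ st → a ≠ i → a ≠ x.2 →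
        a ∉ PySem.Set.add (PySem.Set.add st i) x.2 := by
      intro a h1 h2 h3 hmem
      rcases (PySem.Set.mem_add _ _ _).mp hmem with hmem' | h'
      · rcases (PySem.Set.mem_add _ _ _).mp hmem' with h' | h'
        · exact h1 h'
        · exact h2 h'
      · exact h3 h'
    have hist2 : i ∈ PySem.Set.add (PySem.Set.add st i) x.2 := hmemup i himem
    have htouch' : touched' = PySem.Set.len (PySem.Set.add (PySem.Set.add st i) x.2) + (os.length : Int) := by
      rcases hcount with ⟨hm', ht'⟩ | ⟨hm', ht'⟩
      · rw [ht', htouch, set_add_of_mem hm']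
      · have e1 := set_len_add_of_not_mem hm'
        omega
    have hPmem2 : ∀ c ∈ carriesP, c.2 ∈ PySem.Set.add (PySem.Set.add st i) x.2 :=
      fun c hc => hmemup c.2 (hPmem c hc)
    have hSfresh2 : ∀ z ∈ lowers.drop ptr'.toNat, z.2 ∉ PySem.Set.add (PySem.Set.add st i) x.2 := by
      intro z hz
      obtain ⟨h1, h2, h3⟩ := hSfresh z hz
      exact hnot2 z.2 h1 h2 h3
    have hosfresh2 : ∀ u ∈ os, u.2 ∉ PySem.Set.add (PySem.Set.add st i) x.2 := by
      intro u hu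
      obtain ⟨h1, h2, _⟩ := hosfresh u hu
      exact hnot2 u.2 h1 h2 (hosx u hu)
    -- A side, one unfolding
    rw [aLoop, if_pos hcond]
    split
    case _ heq => simp [hpopA] at heq
    case _ lo rest heq =>
      rw [hpopA] at heq
      injection (Option.some.inj heq) with h1 h2
      subst h1; subst h2
      split
      case _ heq2 => simp at heq2
      case _ ue heq2 =>
        rw [List.getLast?_concat] at heq2
        have hue := Option.some.inj heq2
        subst hue
        simp only [show ((k + r, i) : Int × Int).1 = k + r from rfl,
                   show ((k + r, i) : Int × Int).2 = i from rfl]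
        have hmineq : min (k + r - k) (k - x.1) = take := by omega
        rw [hmineq, if_neg (by omega : ¬ take = 0), List.dropLast_concat]
        by_cases hpb : x.1 + take < k
        · -- pushback: forces take = r, so the upper entry is finished; exit to the outer loop
          have htr : take = r := by omega
          rw [if_pos (by omega : k + r - take = k), if_pos hpb]
          have hB : bInner k lowers (r - take) touched' ptr'
              (if x.1 + take < k then carriesP ++ [(x.1 + take, x.2)] else carriesP)
              = some (touched', ptr', carriesP ++ [(x.1 + take, x.2)]) := by
            rw [if_pos hpb, bInner, dif_neg (by omega : ¬ (0:Int) < r - take)]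
          rw [hB]
          apply hcont (PySem.Set.add (PySem.Set.add st i) x.2)
            (restA ++ [(x.1 + take, x.2)]) (carriesP ++ [(x.1 + take, x.2)]) touched' ptr'
            hp'0 hp'le
          · exact (hrperm.append_right [(x.1 + take, x.2)]).trans
              (perm_shuffle carriesP (lowers.drop ptr'.toNat) (x.1 + take, x.2))
          · intro c hc
            rcases List.mem_append.mp hc with h | h
            · exact hPlt c h
            · simp at h; subst h; simpa using hpb
          · intro c hc
            rcases List.mem_append.mp hc with h | h
            · exact hPmem2 c h
            · simp at h; subst h; exact hx2mem
          · simp only [List.map_append, List.map_cons, List.map_nil]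
            rw [List.nodup_append]
            refine ⟨hPnodup, by simp, fun a ha b hb => ?_⟩
            simp at hb
            subst hb
            intro he
            exact hxP (he ▸ ha)
          · exact hSfresh2
          · exact hosfresh2
          · rw [sumRoom_append, sumRoom_singleton]
            omega
          · exact htouch'
        · rw [if_neg hpb]
          by_cases htr : k + r - take = k
          · -- the upper entry is finished exactly as the lower fills up; exit to the outer loop
            rw [if_pos htr]
            have hB : bInner k lowers (r - take) touched' ptr'
                (if x.1 + take < k then carriesP ++ [(x.1 + take, x.2)] else carriesP)
                = some (touched', ptr', carriesP) := by
              rw [if_neg hpb, bInner, dif_neg (by omega : ¬ (0:Int) < r - take)]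
            rw [hB]
            apply hcont (PySem.Set.add (PySem.Set.add st i) x.2) restA carriesP touched' ptr'
              hp'0 hp'le hrperm hPlt hPmem2 hPnodup hSfresh2 hosfresh2
            · omega
            · exact htouch'
          · -- the upper entry still has excess: recurse (no pushback is possible here)
            rw [if_neg htr]
            have hrw : k + r - take = k + (r - take) := by ring
            rw [hrw, if_neg hpb]
            have hlen' : restA.length < n := by omega
            have := ih restA.length hlen' restA rfl (PySem.Set.add (PySem.Set.add st i) x.2)
              carriesP touched' ptr' (r - take) i (by omega) hp'0 hp'le hrperm hPlt
              (fun c hc => (PySem.Set.mem_add _ _ _).mpr (Or.inl (hPmem2 c hc)))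
              hPnodup
              (by
                intro z hz
                obtain ⟨h1, h2, h3⟩ := hSfresh z hz
                exact ⟨hnot2 z.2 h1 h2 h3, h2⟩)
              (by
                intro u hu
                obtain ⟨h1, h2, h3⟩ := hosfresh u hu
                exact ⟨hnot2 u.2 h1 h2 (hosx u hu), h2, h3⟩)
              (by omega)
              (by rw [set_add_of_mem hist2]; exact htouch')
            exact this
  -- case analysis mirroring B's choice of the popped element
  have hsuffSorted : (lowers.drop ptr.toNat).Pairwise (fun a b => lexLt b a = false) :=
    hsorted.sublist (List.drop_sublist _ _)
  have hBeq : ∀ (r' t' p' : Int) (cs : List (Int × Int)),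
      bInner k lowers r touched ptr carries = bInner k lowers r' t' p' cs →
      (match bInner k lowers r touched ptr carries with
       | none => 0
       | some tpc => bOuter k lowers os tpc.1 tpc.2.1 tpc.2.2)
      = (match bInner k lowers r' t' p' cs with
         | none => 0
         | some tpc => bOuter k lowers os tpc.1 tpc.2.1 tpc.2.2) := by
    intro r' t' p' cs hEq
    rw [hEq]
  cases hcEq : popMin carries with
  | some p =>
    obtain ⟨c, crest⟩ := p
    have hcperm : (c :: crest).Perm carries := popMin_perm carries c crest hcEq
    have hcmin : ∀ z ∈ carries, lexLt z c = false := popMin_min carries c crest hcEq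
    have hc_mem_car : c ∈ carries := hcperm.subset (List.mem_cons_self ..)
    have hc2st : c.2 ∈ PySem.Set.add st i := hcmem c hc_mem_car
    have hcrestsub : ∀ z ∈ crest, z ∈ carries := fun z hz => hcperm.subset (List.mem_cons_of_mem c hz)
    have hcnodup' : (c.2 :: crest.map Prod.snd).Nodup :=
      ((hcperm.map Prod.snd).nodup_iff).mpr hcnodup
    have hcarryKey : ∀ (hminh : ∀ z ∈ heap, lexLt z c = false),
        bInner k lowers r touched ptr carries
          = bInner k lowers (r - min r (k - c.1)) touched ptr
              (if c.1 + min r (k - c.1) < k then crest ++ [(c.1 + min r (k - c.1), c.2)] else crest) →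
        aLoop k m st (base ++ os.reverse ++ [(k + r, i)]) heap =
          (match bInner k lowers r touched ptr carries with
           | none => 0
           | some tpc => bOuter k lowers os tpc.1 tpc.2.1 tpc.2.2) := by
      intro hminh hB
      have hheapP : heap.Perm (c :: (crest ++ lowers.drop ptr.toNat)) :=
        hperm.trans (hcperm.symm.append_right _)
      obtain ⟨restA, hpopA, hrperm⟩ := popMin_of_min heap _ c hheapP hminh
      rw [hBeq _ _ _ _ hB]
      apply key c restA crest ptr touched hpopA hrperm hptr0 hptrle
        (fun z hz => hclt z (hcrestsub z hz))
        (fun z hz => hcmem z (hcrestsub z hz))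
        (List.nodup_cons.mp hcnodup').2
        (List.nodup_cons.mp hcnodup').1
        (by
          intro z hz
          obtain ⟨h1, h2⟩ := hsufffresh z hz
          refine ⟨h1, h2, ?_⟩
          intro hzc
          rcases (PySem.Set.mem_add _ _ _).mp (hzc ▸ hc2st) with h | h
          · exact h1 h
          · exact h2 h)
        (by
          intro u hu
          obtain ⟨h1, h2, _⟩ := hosfresh u hu
          intro huc
          rcases (PySem.Set.mem_add _ _ _).mp (huc ▸ hc2st) with h | h
          · exact h1 h
          · exact h2 h)
        (Or.inl ⟨hc2st, rfl⟩)
    cases hoEq : PySem.List.pyGet? lowers ptr with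
    | some o =>
      have hptrnat : ptr = ((ptr.toNat : Nat) : Int) := (Int.toNat_of_nonneg hptr0).symm
      have ho2 : lowers[ptr.toNat]? = some o := by
        rw [hptrnat, PySem.List.pyGet?_natCast] at hoEq; exact hoEq
      obtain ⟨hlt, hgetEq⟩ := List.getElem?_eq_some_iff.mp ho2
      have hsuffix : lowers.drop ptr.toNat = o :: lowers.drop (ptr.toNat + 1) := by
        rw [List.drop_eq_getElem_cons hlt, hgetEq]
      have hSpair : (o :: lowers.drop (ptr.toNat + 1)).Pairwise (fun a b => lexLt b a = false) :=
        hsuffix ▸ hsuffSorted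
      have hrest_o : ∀ z ∈ lowers.drop (ptr.toNat + 1), lexLt z o = false :=
        (List.pairwise_cons.mp hSpair).1
      have homem : o ∈ lowers.drop ptr.toNat := by rw [hsuffix]; exact List.mem_cons_self ..
      by_cases hlex : lexLt c o = true
      · -- B pops the carry c, the global minimum
        apply hcarryKey
        · intro z hz
          rcases List.mem_append.mp (hperm.subset hz) with h | h
          · exact hcmin z h
          · rw [hsuffix] at h
            rcases List.mem_cons.mp h with rfl | h'
            · exact lexLt_asymm hlex
            · by_contra hzc
              have hzc' : lexLt z c = true := by simpa using hzc
              have := lexLt_trans hzc' hlex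
              rw [hrest_o z h'] at this
              exact Bool.noConfusion this
        · rw [bInner, dif_pos hr]
          split
          case _ c2 crest2 heqc =>
            rw [hcEq] at heqc
            injection (Option.some.inj heqc) with e1 e2
            subst e1; subst e2
            split
            case _ o2 heqo =>
              rw [hoEq] at heqo
              have := Option.some.inj heqo
              subst this
              rw [if_pos hlex]
            case _ heqo => simp [hoEq] at heqo
          case _ heqc => simp [hcEq] at heqc
      · -- B pops the original o, the global minimum
        have hlexF : lexLt c o = false := by simpa using hlex
        have hminh : ∀ z ∈ heap, lexLt z o = false := by
          intro z hz
          rcases List.mem_append.mp (hperm.subset hz) with h | h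
          · by_contra hzo
            have hzo' : lexLt z o = true := by simpa using hzo
            have := lexLt_lt_of_lt_of_nlt hzo' hlexF
            rw [hcmin z h] at this
            exact Bool.noConfusion this
          · rw [hsuffix] at h
            rcases List.mem_cons.mp h with rfl | h'
            · exact lexLt_irrefl _
            · exact hrest_o z h'
        have hheapP : heap.Perm (o :: (carries ++ lowers.drop (ptr.toNat + 1))) := by
          have h1 : heap.Perm (carries ++ (o :: lowers.drop (ptr.toNat + 1))) := by
            rw [← hsuffix]; exact hperm
          exact h1.trans List.perm_middle
        obtain ⟨restA, hpopA, hrperm⟩ := popMin_of_min heap _ o hheapP hminh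
        have hpn : (ptr + 1).toNat = ptr.toNat + 1 := by omega
        have ho2st : o.2 ∉ PySem.Set.add st i := by
          obtain ⟨h1, h2⟩ := hsufffresh o homem
          intro hmem
          rcases (PySem.Set.mem_add _ _ _).mp hmem with h | h
          · exact h1 h
          · exact h2 h
        have hSnodup : (o.2 :: (lowers.drop (ptr.toNat + 1)).map Prod.snd).Nodup := by
          have hsub : (lowers.drop ptr.toNat).map Prod.snd |>.Sublist (lowers.map Prod.snd) :=
            (List.drop_sublist _ _).map _
          have : ((lowers.drop ptr.toNat).map Prod.snd).Nodup := hsub.nodup hnodup_low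
          rw [hsuffix] at this
          simpa using this
        have hB : bInner k lowers r touched ptr carries
            = bInner k lowers (r - min r (k - o.1)) (touched + 1) (ptr + 1)
                (if o.1 + min r (k - o.1) < k then carries ++ [(o.1 + min r (k - o.1), o.2)] else carries) := by
          rw [bInner, dif_pos hr]
          split
          case _ c2 crest2 heqc =>
            rw [hcEq] at heqc
            injection (Option.some.inj heqc) with e1 e2
            subst e1; subst e2
            split
            case _ o2 heqo =>
              rw [hoEq] at heqo
              have := Option.some.inj heqo
              subst this
              rw [if_neg (by simpa using hlex)]
            case _ heqo => simp [hoEq] at heqo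
          case _ heqc => simp [hcEq] at heqc
        rw [hBeq _ _ _ _ hB]
        apply key o restA carries (ptr + 1) (touched + 1) hpopA
          (by rw [hpn]; exact hrperm) (by omega) (by omega) hclt hcmem hcnodup
          (by
            intro hmem
            obtain ⟨c', hc', he⟩ := List.mem_map.mp hmem
            exact ho2st (he ▸ hcmem c' hc'))
          (by
            intro z hz
            rw [hpn] at hz
            have hz' : z ∈ lowers.drop ptr.toNat := by
              rw [hsuffix]; exact List.mem_cons_of_mem o hz
            obtain ⟨h1, h2⟩ := hsufffresh z hz'
            refine ⟨h1, h2, ?_⟩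
            intro he
            have := (List.nodup_cons.mp hSnodup).1
            exact this (he ▸ List.mem_map_of_mem hz)
          )
          (fun u hu => (hosfresh u hu).2.2 o (List.mem_of_mem_drop homem))
          (Or.inr ⟨ho2st, rfl⟩)
    | none =>
      -- the pointer is past the end: the sorted suffix is empty, B pops the carry
      have hsuffnil : lowers.drop ptr.toNat = [] := by
        have ho2 : lowers[ptr.toNat]? = none := by
          rw [(Int.toNat_of_nonneg hptr0).symm, PySem.List.pyGet?_natCast] at hoEq
          exact hoEq
        exact List.drop_eq_nil_of_le (List.getElem?_eq_none_iff.mp ho2)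
      apply hcarryKey
      · intro z hz
        rcases List.mem_append.mp (hperm.subset hz) with h | h
        · exact hcmin z h
        · rw [hsuffnil] at h; exact absurd h (List.not_mem_nil)
      · rw [bInner, dif_pos hr]
        split
        case _ c2 crest2 heqc =>
          rw [hcEq] at heqc
          injection (Option.some.inj heqc) with e1 e2
          subst e1; subst e2
          split
          case _ o2 heqo => simp [hoEq] at heqo
          case _ heqo => rfl
        case _ heqc => simp [hcEq] at heqc
  | none =>
    have hcnil : carries = [] := (popMin_none carries).mp hcEq
    subst hcnil
    cases hoEq : PySem.List.pyGet? lowers ptr with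
    | some o =>
      have hptrnat : ptr = ((ptr.toNat : Nat) : Int) := (Int.toNat_of_nonneg hptr0).symm
      have ho2 : lowers[ptr.toNat]? = some o := by
        rw [hptrnat, PySem.List.pyGet?_natCast] at hoEq; exact hoEq
      obtain ⟨hlt, hgetEq⟩ := List.getElem?_eq_some_iff.mp ho2
      have hsuffix : lowers.drop ptr.toNat = o :: lowers.drop (ptr.toNat + 1) := by
        rw [List.drop_eq_getElem_cons hlt, hgetEq]
      have hSpair : (o :: lowers.drop (ptr.toNat + 1)).Pairwise (fun a b => lexLt b a = false) :=
        hsuffix ▸ hsuffSorted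
      have hrest_o : ∀ z ∈ lowers.drop (ptr.toNat + 1), lexLt z o = false :=
        (List.pairwise_cons.mp hSpair).1
      have homem : o ∈ lowers.drop ptr.toNat := by rw [hsuffix]; exact List.mem_cons_self ..
      have hminh : ∀ z ∈ heap, lexLt z o = false := by
        intro z hz
        rcases List.mem_append.mp (hperm.subset hz) with h | h
        · exact absurd h (List.not_mem_nil)
        · rw [hsuffix] at h
          rcases List.mem_cons.mp h with rfl | h'
          · exact lexLt_irrefl _
          · exact hrest_o z h'
      have hheapP : heap.Perm (o :: ([] ++ lowers.drop (ptr.toNat + 1))) := by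
        have h1 : heap.Perm ([] ++ (o :: lowers.drop (ptr.toNat + 1))) := by
          rw [← hsuffix]; exact hperm
        exact h1.trans List.perm_middle
      obtain ⟨restA, hpopA, hrperm⟩ := popMin_of_min heap _ o hheapP hminh
      have hpn : (ptr + 1).toNat = ptr.toNat + 1 := by omega
      have ho2st : o.2 ∉ PySem.Set.add st i := by
        obtain ⟨h1, h2⟩ := hsufffresh o homem
        intro hmem
        rcases (PySem.Set.mem_add _ _ _).mp hmem with h | h
        · exact h1 h
        · exact h2 h
      have hSnodup : (o.2 :: (lowers.drop (ptr.toNat + 1)).map Prod.snd).Nodup := by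
        have hsub : (lowers.drop ptr.toNat).map Prod.snd |>.Sublist (lowers.map Prod.snd) :=
          (List.drop_sublist _ _).map _
        have : ((lowers.drop ptr.toNat).map Prod.snd).Nodup := hsub.nodup hnodup_low
        rw [hsuffix] at this
        simpa using this
      have hB : bInner k lowers r touched ptr []
          = bInner k lowers (r - min r (k - o.1)) (touched + 1) (ptr + 1)
              (if o.1 + min r (k - o.1) < k then [] ++ [(o.1 + min r (k - o.1), o.2)] else []) := by
        rw [bInner, dif_pos hr]
        split
        case _ c2 crest2 heqc => have hxx := hcEq.symm.trans heqc; simp at hxx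
        case _ heqc =>
          split
          case _ o2 heqo =>
            rw [hoEq] at heqo
            have := Option.some.inj heqo
            subst this
            rfl
          case _ heqo => simp [hoEq] at heqo
      rw [hBeq _ _ _ _ hB]
      apply key o restA [] (ptr + 1) (touched + 1) hpopA
        (by rw [hpn]; exact hrperm) (by omega) (by omega)
        (by intro c hc; exact absurd hc (List.not_mem_nil))
        (by intro c hc; exact absurd hc (List.not_mem_nil))
        (by simp)
        (by simp)
        (by
          intro z hz
          rw [hpn] at hz
          have hz' : z ∈ lowers.drop ptr.toNat := by
            rw [hsuffix]; exact List.mem_cons_of_mem o hz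
          obtain ⟨h1, h2⟩ := hsufffresh z hz'
          refine ⟨h1, h2, ?_⟩
          intro he
          have := (List.nodup_cons.mp hSnodup).1
          exact this (he ▸ List.mem_map_of_mem hz))
        (fun u hu => (hosfresh u hu).2.2 o (List.mem_of_mem_drop homem))
        (Or.inr ⟨ho2st, rfl⟩)
    | none =>
      -- impossible: the heap is empty while excess remains, contradicting need ≤ room
      exfalso
      have hsuffnil : lowers.drop ptr.toNat = [] := by
        have ho2 : lowers[ptr.toNat]? = none := by
          rw [(Int.toNat_of_nonneg hptr0).symm, PySem.List.pyGet?_natCast] at hoEq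
          exact hoEq
        exact List.drop_eq_nil_of_le (List.getElem?_eq_none_iff.mp ho2)
      have hpe := hperm
      rw [hsuffnil] at hpe
      have hnil : heap = [] := by simpa using hpe.eq_nil
      rw [hnil] at hfeas
      simp [sumRoom] at hfeas
      omega


-- bisimulation of A's loop against B's outer loop
theorem outer_sim (k m : Int) (base lowers : List (Int × Int))
    (hbase : (base.length : Int) = m - 1)
    (hlow_le : ∀ x ∈ lowers, x.1 ≤ k)
    (hsorted : lowers.Pairwise (fun a b => lexLt b a = false))
    (hnodup_low : (lowers.map Prod.snd).Nodup) :
    ∀ (os : List (Int × Int)),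
      (∀ x ∈ os, k < x.1) →
      ((os.map Prod.snd).Nodup) →
      (∀ u ∈ os, ∀ x ∈ lowers, u.2 ≠ x.2) →
      ∀ (st : PySem.Set Int) (heap carries : List (Int × Int)) (touched ptr : Int),
      0 ≤ ptr → ptr ≤ (lowers.length : Int) →
      heap.Perm (carries ++ lowers.drop ptr.toNat) →
      (∀ c ∈ carries, c.1 < k) →
      (∀ c ∈ carries, c.2 ∈ st) →
      ((carries.map Prod.snd).Nodup) →
      (∀ x ∈ lowers.drop ptr.toNat, x.2 ∉ st) →
      (∀ u ∈ os, u.2 ∉ st) →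
      sumExcess k os ≤ sumRoom k heap →
      touched = PySem.Set.len st + (os.length : Int) →
      aLoop k m st (base ++ os.reverse) heap = bOuter k lowers os touched ptr carries := by
  intro os
  induction os with
  | nil =>
    intro _ _ _ st heap carries touched ptr _ _ _ _ _ _ _ _ _ htouch
    rw [aLoop, if_neg (by simp; omega : ¬ m ≤ ((base ++ ([] : List (Int × Int)).reverse).length : Int))]
    simp only [bOuter]
    rw [htouch]
    simp
  | cons u os' ihos =>
    intro hup hnodup hdisj st heap carries touched ptr hp0 hple hperm hclt hcmem hcnodup hsfresh hofresh hfeas htouch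
    have hu1 : k < u.1 := hup u (List.mem_cons_self ..)
    have hu2st : u.2 ∉ st := hofresh u (List.mem_cons_self ..)
    have hupair : ((k + (u.1 - k), u.2) : Int × Int) = u := by
      obtain ⟨a, b⟩ := u; rw [Prod.mk.injEq]; exact ⟨by ring, rfl⟩
    have hshape : base ++ (u :: os').reverse = base ++ os'.reverse ++ [(k + (u.1 - k), u.2)] := by
      rw [List.reverse_cons, hupair, ← List.append_assoc]
    rw [hshape]
    have hnodup' : u.2 ∉ os'.map Prod.snd ∧ (os'.map Prod.snd).Nodup := by
      simp only [List.map_cons] at hnodup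
      exact ⟨(List.nodup_cons.mp hnodup).1, (List.nodup_cons.mp hnodup).2⟩
    have hBshape : bOuter k lowers (u :: os') touched ptr carries =
        (match bInner k lowers (u.1 - k) touched ptr carries with
         | none => 0
         | some tpc => bOuter k lowers os' tpc.1 tpc.2.1 tpc.2.2) := rfl
    rw [hBshape]
    apply inner_sim k m base lowers hbase hlow_le hsorted hnodup_low os'
      (fun x hx => hup x (List.mem_cons_of_mem u hx))
      (fun st' heap' carries' touched' ptr' h1 h2 h3 h4 h5 h6 h7 h8 h9 h10 =>
        ihos (fun x hx => hup x (List.mem_cons_of_mem u hx)) hnodup'.2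
          (fun v hv => hdisj v (List.mem_cons_of_mem u hv))
          st' heap' carries' touched' ptr' h1 h2 h3 h4 h5 h6 h7 h8 h9 h10)
      heap.length heap rfl st carries touched ptr (u.1 - k) u.2 (by omega) hp0 hple hperm hclt
      (fun c hc => (PySem.Set.mem_add _ _ _).mpr (Or.inl (hcmem c hc)))
      hcnodup
      (by
        intro z hz
        refine ⟨hsfresh z hz, ?_⟩
        exact fun he => hdisj u (List.mem_cons_self ..) z (List.mem_of_mem_drop hz) he.symm)
      (by
        intro v hv
        refine ⟨hofresh v (List.mem_cons_of_mem u hv), ?_, hdisj v (List.mem_cons_of_mem u hv)⟩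
        intro he
        exact hnodup'.1 (he ▸ List.mem_map_of_mem hv))
      (by
        rw [sumExcess_cons] at hfeas
        omega)
      (by
        have e1 := set_len_add_of_not_mem hu2st
        simp only [List.length_cons] at htouch
        push_cast at htouch
        omega)


-- ===== VERDICT (by name: the statement is the Claim_ definition above) =====
theorem move_numbers_spec : Claim_equal_move_numbers := by
  intro cap k score m _hD hm
  unfold Pre_move_numbers at hm
  unfold Spec_move_numbers move_numbers move_numbers_alt
  simp only [initA k (PySem.List.enumerate score) [] [], List.nil_append]
  set en := PySem.List.enumerate score with hen
  set upr := (en.filter (fun p => decide (k < p.2))).map (fun p => (p.2, p.1)) with hupr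
  set lf := en.filter (fun p => decide (p.2 ≤ k)) with hlf
  set L0 := lf.map (fun p => (p.2, p.1)) with hL0
  by_cases hlen : (upr.length : Int) < m
  · rw [if_pos hlen, if_pos hlen]
  · rw [if_neg hlen, if_neg hlen]
    have hennodup : (en.map (fun x => x.1)).Nodup := by
      rw [hen, PySem.List.map_fst_enumerate]
      exact PySem.List.nodup_pyRange_one _ _
    have hinj : ∀ p ∈ en, ∀ q ∈ en, p.1 = q.1 → p = q :=
      fun p hp q hq h => List.inj_on_of_nodup_map hennodup hp hq h
    have hupr_up : ∀ x ∈ upr, k < x.1 := by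
      intro x hx
      obtain ⟨p, hp, rfl⟩ := List.mem_map.mp hx
      have := (List.mem_filter.mp hp).2
      simpa using this
    have hL0_le : ∀ x ∈ L0, x.1 ≤ k := by
      intro x hx
      obtain ⟨p, hp, rfl⟩ := List.mem_map.mp hx
      have := (List.mem_filter.mp hp).2
      simpa using this
    set lw := L0.mergeSort (fun a b => !lexLt b a) with hlw
    have hperm0 : lw.Perm L0 := List.mergeSort_perm L0 _
    have hsorted : lw.Pairwise (fun a b => lexLt b a = false) := by
      have htr : ∀ a b c : Int × Int, (!lexLt b a) = true → (!lexLt c b) = true → (!lexLt c a) = true := by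
        intro a b c h1 h2
        simp only [Bool.not_eq_true'] at h1 h2 ⊢
        exact lexLt_neg_trans h1 h2
      have htot : ∀ a b : Int × Int, ((!lexLt b a) || (!lexLt a b)) = true := by
        intro a b
        by_cases h : lexLt b a = true
        · have := lexLt_asymm h
          simp [h, this]
        · simp [Bool.not_eq_true] at h
          simp [h]
      have h := List.pairwise_mergeSort htr htot L0
      exact h.imp (fun hab => by simpa using hab)
    have hmapmap : ∀ (l : List (Int × Int)),
        (l.map (fun p => (p.2, p.1))).map Prod.snd = l.map (fun x => x.1) := by
      intro l; rw [List.map_map]; rfl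
    have hlfsub : lf.Sublist en := List.filter_sublist
    have hufsub : (en.filter (fun p => decide (k < p.2))).Sublist en := List.filter_sublist
    have hL0nodup : (L0.map Prod.snd).Nodup := by
      rw [hL0, hmapmap]
      exact ((hlfsub.map _).nodup hennodup)
    have hnodup_lw : (lw.map Prod.snd).Nodup := ((hperm0.map Prod.snd).nodup_iff).mpr hL0nodup
    have hlw_le : ∀ x ∈ lw, x.1 ≤ k := fun x hx => hL0_le x (hperm0.subset hx)
    have hupnodup : (upr.map Prod.snd).Nodup := by
      rw [hupr, hmapmap]
      exact ((hufsub.map _).nodup hennodup)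
    have hdisj : ∀ u ∈ upr, ∀ x ∈ lw, u.2 ≠ x.2 := by
      intro u hu x hx he
      obtain ⟨p, hp, rfl⟩ := List.mem_map.mp hu
      obtain ⟨q, hq, rfl⟩ := List.mem_map.mp (hperm0.subset hx)
      have hpq : p = q := hinj p (List.Sublist.subset hufsub hp) q (List.Sublist.subset hlfsub hq) he
      subst hpq
      have h1 := (List.mem_filter.mp hp).2
      have h2 := (List.mem_filter.mp hq).2
      simp at h1 h2
      omega
    set proc := upr.drop (m - 1).toNat with hproc
    by_cases hfe : sumRoom k lw < sumExcess k proc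
    · rw [if_pos hfe]
      apply aLoop_infeasible k m hm (upr.length + L0.length) upr L0 rfl hupr_up hL0_le
      rw [← sumRoom_perm k hperm0]
      exact hfe
    · rw [if_neg hfe]
      have hdle : (m - 1).toNat ≤ upr.length := by omega
      set base := upr.take (m - 1).toNat with hbase0
      have hsplit : upr = base ++ proc := (List.take_append_drop _ _).symm
      have hbaselen : (base.length : Int) = m - 1 := by
        rw [hbase0]
        simp [List.length_take]
        omega
      have hmain := outer_sim k m base lw hbaselen hlw_le hsorted hnodup_lw proc.reverse
        (fun x hx => hupr_up x (List.mem_of_mem_drop (List.mem_reverse.mp hx)))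
        (by
          rw [List.map_reverse, List.nodup_reverse]
          exact ((List.drop_sublist _ _).map _).nodup hupnodup)
        (fun u hu x hx => hdisj u (List.mem_of_mem_drop (List.mem_reverse.mp hu)) x hx)
        PySem.Set.empty L0 [] ((upr.length : Int) - (m - 1)) 0
        (le_refl 0) (by positivity)
        (by simpa using hperm0.symm)
        (by simp)
        (by simp)
        (by simp)
        (by intro x hx; simp [PySem.Set.empty])
        (by intro u hu; simp [PySem.Set.empty])
        (by
          rw [sumExcess_perm k (List.reverse_perm proc), ← sumRoom_perm k hperm0]
          omega)
        (by
          have hpl : proc.length = upr.length - (m - 1).toNat := by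
            rw [hproc, List.length_drop]
          simp [PySem.Set.len, PySem.Set.empty, hpl]
          push_cast
          omega)
      rw [List.reverse_reverse] at hmain
      conv_lhs => rw [hsplit]
      exact hmain
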